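-- pv_equiv track=rewrite | github.com/elazarg/stratlet | lean-defs.py | _update_comment_depth
-- ===== SOURCE A (Python) =====
-- def _update_comment_depth(line, depth):
--     """Track /- ... -/ nesting depth changes across a single line."""
--     i = 0
--     n = len(line)
--     while i < n - 1:
--         if line[i] == "/" and line[i + 1] == "-":
--             depth += 1
--             i += 2
--         elif line[i] == "-" and line[i + 1] == "/":
--             depth = max(0, depth - 1)
--             i += 2
--         else:
--             i += 1
--     return depth
-- ===== SOURCE B (Python) =====
-- def _update_comment_depth(line, depth):
--     """Track /- ... -/ nesting depth changes across a single line."""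
--     while True:
--         o = line.find("/-")
--         c = line.find("-/")
--         if o == -1 and c == -1:
--             return depth
--         if c == -1 or (o != -1 and o < c):
--             depth += 1
--             line = line[o + 2:]
--         else:
--             depth = max(0, depth - 1)
--             line = line[c + 2:]
-- ===== Notes on version B (the rewrite author's own statement) =====
-- stated objective: faster
-- what changed: Replaces the per-character index scan with pairwise char comparisons by a loop that uses str.find to jump directly to the nearest '/-' or '-/' marker and slices the line past it.
import Mathlib
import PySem

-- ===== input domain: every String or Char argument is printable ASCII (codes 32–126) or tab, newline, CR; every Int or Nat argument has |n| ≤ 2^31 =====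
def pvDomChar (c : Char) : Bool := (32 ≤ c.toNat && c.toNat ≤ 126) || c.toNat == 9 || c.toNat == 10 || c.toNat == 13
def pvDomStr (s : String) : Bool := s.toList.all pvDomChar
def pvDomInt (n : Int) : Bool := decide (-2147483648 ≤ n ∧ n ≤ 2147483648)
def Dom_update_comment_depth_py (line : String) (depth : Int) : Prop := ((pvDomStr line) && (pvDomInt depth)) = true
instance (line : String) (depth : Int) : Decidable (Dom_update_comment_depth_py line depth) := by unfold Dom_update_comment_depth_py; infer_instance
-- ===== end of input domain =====

-- B replaces the per-character scan by repeated str.find hops to the nearest marker (measured faster: find runs in C).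

-- ===== PORT A =====
-- A's index loop 'while i < n - 1' with steps i+1 / i+2 becomes structural recursion on the char list:
-- looking at line[i], line[i+1] is looking at the first two chars of the remaining suffix.
def pvGoA : List Char → Int → Int
  | c1 :: c2 :: rest, depth =>
    if c1 = '/' ∧ c2 = '-' then pvGoA rest (depth + 1)
    else if c1 = '-' ∧ c2 = '/' then pvGoA rest (max 0 (depth - 1))
    else pvGoA (c2 :: rest) depth
  | _, depth => depth

def update_comment_depth_py (line : String) (depth : Int) : Int :=
  pvGoA line.toList depth

-- ===== PORT B =====
-- Source B's 'line = line[pos + 2:]' with pos = find result ≥ 0 is List.drop (pos+2).toNat on the chars.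
def pvGoB (l : List Char) (depth : Int) : Int :=
  let o := PySem.Chars.find l ['/', '-']
  let c := PySem.Chars.find l ['-', '/']
  if h1 : o = -1 ∧ c = -1 then depth
  else if h2 : c = -1 ∨ (¬ o = -1 ∧ o < c) then pvGoB (l.drop (o + 2).toNat) (depth + 1)
  else pvGoB (l.drop (c + 2).toNat) (max 0 (depth - 1))
termination_by l.length
decreasing_by
  · have ho : o = PySem.Chars.find l ['/', '-'] := rfl
    have hne : ¬ o = -1 := by
      rcases h2 with h | h
      · intro hh; exact h1 ⟨hh, h⟩
      · exact h.1
    have h0 : (0 : Int) ≤ o := by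
      have := PySem.Chars.neg_one_le_find l ['/', '-']
      rw [← ho] at this; omega
    have hsp := (PySem.Chars.find_spec (s := l) (sub := ['/', '-']) (by rw [← ho]; exact h0)).1
    rw [← ho] at hsp
    have hlen := List.IsPrefix.length_le hsp
    simp only [List.length_drop, List.length_cons, List.length_nil] at hlen ⊢
    omega
  · have hc : c = PySem.Chars.find l ['-', '/'] := rfl
    have hne : ¬ c = -1 := by intro hh; exact h2 (Or.inl hh)
    have h0 : (0 : Int) ≤ c := by
      have := PySem.Chars.neg_one_le_find l ['-', '/']
      rw [← hc] at this; omega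
    have hsp := (PySem.Chars.find_spec (s := l) (sub := ['-', '/']) (by rw [← hc]; exact h0)).1
    rw [← hc] at hsp
    have hlen := List.IsPrefix.length_le hsp
    simp only [List.length_drop, List.length_cons, List.length_nil] at hlen ⊢
    omega

def update_comment_depth_py_alt (line : String) (depth : Int) : Int :=
  pvGoB line.toList depth

-- ===== PRECONDITION & SPEC =====
def Spec_update_comment_depth_py (line : String) (depth : Int) (out : Int) : Prop := out = update_comment_depth_py_alt line depth
instance (line : String) (depth : Int) (out : Int) : Decidable (Spec_update_comment_depth_py line depth out) := by unfold Spec_update_comment_depth_py; infer_instance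

-- ===== CLAIM (what is proved, stated in full; the proofs are below) =====
def Claim_equal_update_comment_depth_py : Prop := ∀ (line : String) (depth : Int), Dom_update_comment_depth_py line depth → Spec_update_comment_depth_py line depth (update_comment_depth_py line depth)

-- ===== LEMMAS AND PROOFS =====

-- definitional unfoldings of PySem.Chars.find.go
theorem pv_go_nil (sub : List Char) (k : Nat) :
    PySem.Chars.find.go sub [] k = if sub.isEmpty = true then (k : Int) else -1 := rfl

theorem pv_go_cons (sub : List Char) (a : Char) (t : List Char) (k : Nat) :
    PySem.Chars.find.go sub (a :: t) k =
      if sub.isPrefixOf (a :: t) = true then (k : Int) else PySem.Chars.find.go sub t (k + 1) := rfl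

-- find.go with counter k, expressed through find (counter 0)
theorem pv_find_go_shift (sub : List Char) (hs : sub.isEmpty = false) :
    ∀ (t : List Char) (k : Nat), PySem.Chars.find.go sub t k =
      if PySem.Chars.find t sub = -1 then -1 else (k : Int) + PySem.Chars.find t sub := by
  intro t
  induction t with
  | nil =>
    intro k
    rw [pv_go_nil]
    simp [PySem.Chars.find, pv_go_nil, hs]
  | cons a t ih =>
    intro k
    have hf : PySem.Chars.find (a :: t) sub =
        if sub.isPrefixOf (a :: t) = true then 0 else PySem.Chars.find.go sub t 1 := by
      rw [PySem.Chars.find, pv_go_cons]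
      norm_num
    rw [pv_go_cons, hf]
    by_cases hp : sub.isPrefixOf (a :: t) = true
    · rw [if_pos hp, if_pos hp]
      norm_num
    · rw [if_neg hp, if_neg hp, ih (k + 1), ih 1]
      have hge := PySem.Chars.neg_one_le_find t sub
      by_cases h : PySem.Chars.find t sub = -1
      · rw [if_pos h, if_pos h, if_pos (by rfl)]
      · rw [if_neg h, if_neg h, if_neg (by omega)]
        push_cast; ring

-- find on a cons cell
theorem pv_find_cons (sub : List Char) (hs : sub.isEmpty = false) (a : Char) (t : List Char) :
    PySem.Chars.find (a :: t) sub =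
      if sub.isPrefixOf (a :: t) = true then 0
      else if PySem.Chars.find t sub = -1 then -1 else 1 + PySem.Chars.find t sub := by
  rw [PySem.Chars.find, pv_go_cons, pv_find_go_shift sub hs t 1]
  norm_num

theorem pv_find_short (sub : List Char) (l : List Char) (hl : l.length < sub.length) : PySem.Chars.find l sub = -1 := by
  rw [PySem.Chars.find_eq_neg_one_iff]
  intro hinf
  exact absurd (List.IsInfix.length_le hinf) (by omega)

-- core equivalence, by strong induction on the length of the char list
theorem pvGoB_eq (l : List Char) (d : Int) : pvGoB l d =
    (if PySem.Chars.find l ['/', '-'] = -1 ∧ PySem.Chars.find l ['-', '/'] = -1 then d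
     else if PySem.Chars.find l ['-', '/'] = -1 ∨
         (¬ PySem.Chars.find l ['/', '-'] = -1 ∧
           PySem.Chars.find l ['/', '-'] < PySem.Chars.find l ['-', '/']) then
       pvGoB (l.drop (PySem.Chars.find l ['/', '-'] + 2).toNat) (d + 1)
     else pvGoB (l.drop (PySem.Chars.find l ['-', '/'] + 2).toNat) (max 0 (d - 1))) := by
  rw [pvGoB]
  simp only [dite_eq_ite]

theorem pv_main : ∀ (n : Nat) (l : List Char), l.length ≤ n → ∀ d, pvGoA l d = pvGoB l d := by
  intro n
  induction n with
  | zero =>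
    intro l hl d
    have : l = [] := List.length_eq_zero_iff.mp (Nat.le_zero.mp hl)
    subst this
    rw [pvGoB_eq]
    have f1 : PySem.Chars.find ([] : List Char) ['/', '-'] = -1 :=
      pv_find_short ['/', '-'] [] (by decide)
    have f2 : PySem.Chars.find ([] : List Char) ['-', '/'] = -1 :=
      pv_find_short ['-', '/'] [] (by decide)
    simp [pvGoA, f1, f2]
  | succ n ih =>
    intro l hl d
    match l with
    | [] =>
      rw [pvGoB_eq]
      have f1 : PySem.Chars.find ([] : List Char) ['/', '-'] = -1 :=
        pv_find_short ['/', '-'] [] (by decide)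
      have f2 : PySem.Chars.find ([] : List Char) ['-', '/'] = -1 :=
        pv_find_short ['-', '/'] [] (by decide)
      simp [pvGoA, f1, f2]
    | [a] =>
      rw [pvGoB_eq]
      have f1 : PySem.Chars.find [a] ['/', '-'] = -1 :=
        pv_find_short ['/', '-'] [a] (by simp)
      have f2 : PySem.Chars.find [a] ['-', '/'] = -1 :=
        pv_find_short ['-', '/'] [a] (by simp)
      simp [pvGoA, f1, f2]
    | a :: b :: r =>
      simp only [List.length_cons] at hl
      by_cases hob : a = '/' ∧ b = '-'
      · obtain ⟨rfl, rfl⟩ := hob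
        have hfO : PySem.Chars.find ('/' :: '-' :: r) ['/', '-'] = 0 := by
          rw [pv_find_cons _ (by decide)]
          simp [List.isPrefixOf]
        have hc' : (-1 : Int) ≤ PySem.Chars.find ('-' :: r) ['-', '/'] :=
          PySem.Chars.neg_one_le_find _ _
        have hfC : PySem.Chars.find ('/' :: '-' :: r) ['-', '/'] = -1 ∨
            1 ≤ PySem.Chars.find ('/' :: '-' :: r) ['-', '/'] := by
          rw [pv_find_cons _ (by decide), if_neg (by simp [List.isPrefixOf])]
          split_ifs with h
          · left; rfl
          · right; omega
        rw [pvGoB_eq, hfO]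
        rw [if_neg (by omega), if_pos (by omega)]
        norm_num
        exact ih r (by omega) (d + 1)
      · by_cases hcb : a = '-' ∧ b = '/'
        · obtain ⟨rfl, rfl⟩ := hcb
          have hfC : PySem.Chars.find ('-' :: '/' :: r) ['-', '/'] = 0 := by
            rw [pv_find_cons _ (by decide)]
            simp [List.isPrefixOf]
          have ho' : (-1 : Int) ≤ PySem.Chars.find ('/' :: r) ['/', '-'] :=
            PySem.Chars.neg_one_le_find _ _
          have hfO : PySem.Chars.find ('-' :: '/' :: r) ['/', '-'] = -1 ∨
              1 ≤ PySem.Chars.find ('-' :: '/' :: r) ['/', '-'] := by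
            rw [pv_find_cons _ (by decide), if_neg (by simp [List.isPrefixOf])]
            split_ifs with h
            · left; rfl
            · right; omega
          rw [pvGoB_eq, hfC]
          rw [if_neg (by omega), if_neg (by omega)]
          norm_num
          have : pvGoA ('-' :: '/' :: r) d = pvGoA r (max 0 (d - 1)) := by
            rw [pvGoA]
            rw [if_neg (by simp), if_pos (by simp)]
          rw [this]
          exact ih r (by omega) _
        · -- no marker at the head: both finds shift by one
          have hstep : pvGoA (a :: b :: r) d = pvGoA (b :: r) d := by
            rw [pvGoA]
            rw [if_neg hob, if_neg hcb]
          have hpo : List.isPrefixOf ['/', '-'] (a :: b :: r) = false := by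
            simp only [List.isPrefixOf, Bool.and_eq_false_iff, beq_eq_false_iff_ne]
            by_cases h : a = '/'
            · right; left; intro hb; exact hob ⟨h, hb.symm⟩
            · left; exact fun hh => h hh.symm
          have hpc : List.isPrefixOf ['-', '/'] (a :: b :: r) = false := by
            simp only [List.isPrefixOf, Bool.and_eq_false_iff, beq_eq_false_iff_ne]
            by_cases h : a = '-'
            · right; left; intro hb; exact hcb ⟨h, hb.symm⟩
            · left; exact fun hh => h hh.symm
          have hfO := pv_find_cons ['/', '-'] (by decide) a (b :: r)
          have hfC := pv_find_cons ['-', '/'] (by decide) a (b :: r)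
          rw [hpo] at hfO
          rw [hpc] at hfC
          simp only [Bool.false_eq_true, if_false] at hfO hfC
          have ho' : (-1 : Int) ≤ PySem.Chars.find (b :: r) ['/', '-'] :=
            PySem.Chars.neg_one_le_find _ _
          have hc' : (-1 : Int) ≤ PySem.Chars.find (b :: r) ['-', '/'] :=
            PySem.Chars.neg_one_le_find _ _
          rw [hstep, ih (b :: r) (by simp only [List.length_cons]; omega) d,
            pvGoB_eq (a :: b :: r), pvGoB_eq (b :: r)]
          by_cases ho : PySem.Chars.find (b :: r) ['/', '-'] = -1
          · rw [if_pos ho] at hfO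
            by_cases hc : PySem.Chars.find (b :: r) ['-', '/'] = -1
            · rw [if_pos hc] at hfC
              rw [if_pos ⟨ho, hc⟩, if_pos ⟨hfO, hfC⟩]
            · rw [if_neg hc] at hfC
              rw [if_neg (fun h => hc h.2),
                  if_neg (by intro h; rcases h with h | h; exact hc h; exact h.1 ho),
                  if_neg (by rw [hfO, hfC]; omega),
                  if_neg (by rw [hfO, hfC]; omega)]
              rw [hfC]
              have h1 : ((1 + PySem.Chars.find (b :: r) ['-', '/']) + 2).toNat
                  = (PySem.Chars.find (b :: r) ['-', '/'] + 2).toNat + 1 := by omega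
              rw [h1, List.drop_succ_cons]
          · rw [if_neg ho] at hfO
            by_cases hc : PySem.Chars.find (b :: r) ['-', '/'] = -1
            · rw [if_pos hc] at hfC
              rw [if_neg (fun h => ho h.1),
                  if_pos (Or.inl hc),
                  if_neg (by rw [hfO, hfC]; omega),
                  if_pos (Or.inl hfC)]
              rw [hfO]
              have h1 : ((1 + PySem.Chars.find (b :: r) ['/', '-']) + 2).toNat
                  = (PySem.Chars.find (b :: r) ['/', '-'] + 2).toNat + 1 := by omega
              rw [h1, List.drop_succ_cons]
            · rw [if_neg hc] at hfC
              by_cases hlt : PySem.Chars.find (b :: r) ['/', '-'] < PySem.Chars.find (b :: r) ['-', '/']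
              · rw [if_neg (fun h => ho h.1),
                    if_pos (Or.inr ⟨ho, hlt⟩),
                    if_neg (by rw [hfO, hfC]; omega),
                    if_pos (by rw [hfO, hfC]; omega)]
                rw [hfO]
                have h1 : ((1 + PySem.Chars.find (b :: r) ['/', '-']) + 2).toNat
                    = (PySem.Chars.find (b :: r) ['/', '-'] + 2).toNat + 1 := by omega
                rw [h1, List.drop_succ_cons]
              · rw [if_neg (fun h => ho h.1),
                    if_neg (by intro h; rcases h with h | h; exact hc h; exact hlt h.2),
                    if_neg (by rw [hfO, hfC]; omega),
                    if_neg (by rw [hfO, hfC]; omega)]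
                rw [hfC]
                have h1 : ((1 + PySem.Chars.find (b :: r) ['-', '/']) + 2).toNat
                    = (PySem.Chars.find (b :: r) ['-', '/'] + 2).toNat + 1 := by omega
                rw [h1, List.drop_succ_cons]

-- ===== VERDICT (by name: the statement is the Claim_ definition above) =====
theorem update_comment_depth_py_spec : Claim_equal_update_comment_depth_py := by
  intro line depth _
  unfold Spec_update_comment_depth_py update_comment_depth_py update_comment_depth_py_alt
  exact pv_main line.toList.length line.toList le_rfl depth
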